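-- pv_equiv track=rewrite | github.com/doostiyan/nubirobot | app-blockchain/utils.py | split_batch_input_data
-- ===== SOURCE A (Python) =====
-- def split_batch_input_data(input_data: str, splitter: str) -> list:
--     parts = []
--     current_part = ''
--
--     for i in range(0, len(input_data), 64):
--         chunk = input_data[i:i + 64]  # Chunk input data into 64-character part
--         if chunk == splitter:  # Check if the chunk is the splitter
--             if current_part:
--                 parts.append(current_part)
--             current_part = ''
--         else:
--             current_part += chunk
--
--     if current_part:
--         parts.append(current_part)
--
--     return parts
-- ===== SOURCE B (Python) =====
-- def split_batch_input_data(input_data: str, splitter: str) -> list: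
--     # Cut into 64-char chunks first, then group maximal runs of non-splitter
--     # chunks with a two-pointer scan and join each run.
--     chunks = [input_data[i:i + 64] for i in range(0, len(input_data), 64)]
--     parts = []
--     i, n = 0, len(chunks)
--     while i < n:
--         if chunks[i] == splitter:
--             i += 1
--         else:
--             j = i + 1
--             while j < n and chunks[j] != splitter:
--                 j += 1
--             parts.append(''.join(chunks[i:j]))
--             i = j
--     return parts
-- ===== Notes on version B (the rewrite author's own statement) =====
-- stated objective: alternative
-- what changed: B first materialises the list of 64-char chunks and then groups maximal runs of non-splitter chunks with a two-pointer scan, joining each run at once, instead of A's single stateful pass with a current_part accumulator and an end-of-loop flush.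
import Mathlib
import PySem

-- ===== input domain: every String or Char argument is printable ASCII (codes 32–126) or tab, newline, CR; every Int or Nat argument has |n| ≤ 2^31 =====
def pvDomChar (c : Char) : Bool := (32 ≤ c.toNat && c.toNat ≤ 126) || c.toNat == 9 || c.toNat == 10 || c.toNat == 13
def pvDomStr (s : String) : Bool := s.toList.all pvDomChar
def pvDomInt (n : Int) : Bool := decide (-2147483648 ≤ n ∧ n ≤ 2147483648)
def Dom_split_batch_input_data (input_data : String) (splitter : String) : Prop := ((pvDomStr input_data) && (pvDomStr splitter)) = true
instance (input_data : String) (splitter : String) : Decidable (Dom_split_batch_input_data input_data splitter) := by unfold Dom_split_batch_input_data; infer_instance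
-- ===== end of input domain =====

-- B groups maximal runs of non-splitter 64-char chunks over a precomputed chunk
-- list instead of A's stateful accumulator pass; same result, proved equal.

-- ===== PORT A =====
-- one loop step of A: chunk == splitter → flush current_part, else extend it
def pvStepA (sp : List Char) (st : List (List Char) × List Char) (chunk : List Char) :
    List (List Char) × List Char :=
  if chunk = sp then (if st.2 ≠ [] then st.1 ++ [st.2] else st.1, [])
  else (st.1, st.2 ++ chunk)

def split_batch_input_data (input_data : String) (splitter : String) : List String :=
  let cs := input_data.toList
  let sp := splitter.toList
  let st := (PySem.List.pyRange 0 (PySem.Str.len input_data) 64).foldl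
    (fun st i => pvStepA sp st (PySem.List.slice cs (some i) (some (i + 64)))) ([], [])
  let parts := if st.2 ≠ [] then st.1 ++ [st.2] else st.1
  parts.map String.ofList

-- ===== PORT B =====
-- B's outer while loop: skip splitter chunks, otherwise take the whole run
-- (inner while j) and continue after it
def pvGoB (sp : List Char) : List (List Char) → List (List Char)
  | [] => []
  | c :: cs =>
    if c = sp then pvGoB sp cs
    else (c ++ (cs.takeWhile (· ≠ sp)).flatten) :: pvGoB sp (cs.dropWhile (· ≠ sp))
termination_by l => l.length
decreasing_by
  · simp
  · exact Nat.lt_succ_of_le (List.length_dropWhile_le _ _)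

def split_batch_input_data_alt (input_data : String) (splitter : String) : List String :=
  let cs := input_data.toList
  let sp := splitter.toList
  let chunks := (PySem.List.pyRange 0 (PySem.Str.len input_data) 64).map
    (fun i => PySem.List.slice cs (some i) (some (i + 64)))
  (pvGoB sp chunks).map String.ofList

-- ===== PRECONDITION & SPEC =====
def Spec_split_batch_input_data (input_data : String) (splitter : String) (out : List String) : Prop := out = split_batch_input_data_alt input_data splitter
instance (input_data : String) (splitter : String) (out : List String) : Decidable (Spec_split_batch_input_data input_data splitter out) := by unfold Spec_split_batch_input_data; infer_instance

-- ===== CLAIM (what is proved, stated in full; the proofs are below) =====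
def Claim_equal_split_batch_input_data : Prop := ∀ (input_data : String) (splitter : String), Dom_split_batch_input_data input_data splitter → Spec_split_batch_input_data input_data splitter (split_batch_input_data input_data splitter)

-- ===== LEMMAS AND PROOFS =====

-- A's result as a function of the pending current_part and the remaining chunks
def pvRes (sp cur : List Char) : List (List Char) → List (List Char)
  | [] => if cur = [] then [] else [cur]
  | c :: cs =>
    if c = sp then (if cur = [] then [] else [cur]) ++ pvGoB sp cs
    else (cur ++ c ++ (cs.takeWhile (· ≠ sp)).flatten) :: pvGoB sp (cs.dropWhile (· ≠ sp))

theorem pvGoB_nil (sp : List Char) : pvGoB sp [] = [] := by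
  conv_lhs => rw [pvGoB]

theorem pvGoB_cons (sp c : List Char) (cs : List (List Char)) :
    pvGoB sp (c :: cs) = if c = sp then pvGoB sp cs
      else (c ++ (cs.takeWhile (· ≠ sp)).flatten) :: pvGoB sp (cs.dropWhile (· ≠ sp)) := by
  conv_lhs => rw [pvGoB]

theorem pvRes_nil (sp : List Char) (chunks : List (List Char)) :
    pvRes sp [] chunks = pvGoB sp chunks := by
  cases chunks with
  | nil => simp [pvRes, pvGoB_nil]
  | cons c cs =>
    by_cases h : c = sp <;> simp [pvRes, pvGoB_cons, h]

theorem pvRes_merge (sp cur c : List Char) (cs : List (List Char))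
    (hc : c ≠ []) (hne : c ≠ sp) :
    pvRes sp cur (c :: cs) = pvRes sp (cur ++ c) cs := by
  cases cs with
  | nil =>
    have : cur ++ c ≠ [] := by simp [hc]
    simp [pvRes, hne, this, pvGoB_nil]
  | cons c' cs' =>
    by_cases h' : c' = sp
    · have : cur ++ c ≠ [] := by simp [hc]
      simp [pvRes, hne, h', this, pvGoB_cons]
    · simp [pvRes, hne, h', List.append_assoc]

theorem pvMain (sp : List Char) (chunks : List (List Char))
    (hne : ∀ c ∈ chunks, c ≠ []) (p : List (List Char)) (cur : List Char) :
    (if (chunks.foldl (pvStepA sp) (p, cur)).2 ≠ [] then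
       (chunks.foldl (pvStepA sp) (p, cur)).1 ++ [(chunks.foldl (pvStepA sp) (p, cur)).2]
     else (chunks.foldl (pvStepA sp) (p, cur)).1) = p ++ pvRes sp cur chunks := by
  induction chunks generalizing p cur with
  | nil =>
    by_cases h : cur = [] <;> simp [pvRes, h]
  | cons c cs ih =>
    by_cases h : c = sp
    · -- splitter chunk: flush
      by_cases hcur : cur = []
      · simp only [List.foldl_cons, pvStepA, h, hcur]
        rw [ih (fun x hx => hne x (List.mem_cons_of_mem _ hx))]
        simp [pvRes]
        cases cs with
        | nil => simp [pvGoB_nil]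
        | cons a l => by_cases ha : a = sp <;> simp [pvGoB_cons, ha]
      · simp only [List.foldl_cons, pvStepA, h]
        rw [if_pos hcur]
        rw [ih (fun x hx => hne x (List.mem_cons_of_mem _ hx))]
        simp [pvRes, hcur]
        cases cs with
        | nil => simp [pvGoB_nil]
        | cons a l => by_cases ha : a = sp <;> simp [pvGoB_cons, ha]
    · -- non-splitter chunk: extend current_part
      simp only [List.foldl_cons, pvStepA, if_neg h]
      rw [ih (fun x hx => hne x (List.mem_cons_of_mem _ hx))]
      rw [pvRes_merge sp cur c cs (hne c (List.mem_cons_self)) h]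

theorem pvChunk_ne (cs : List Char) (i : Int) (h0 : 0 ≤ i) (hlt : i < cs.length) :
    PySem.List.slice cs (some i) (some (i + 64)) ≠ [] := by
  rw [PySem.List.slice_toNat cs h0 (by omega)]
  have hi : i.toNat < cs.length := by omega
  have : ((cs.drop i.toNat).take ((i + 64).toNat - i.toNat)).length ≠ 0 := by
    simp [List.length_take, List.length_drop]
    omega
  intro hnil
  exact this (by rw [hnil]; rfl)

-- ===== VERDICT (by name: the statement is the Claim_ definition above) =====
theorem split_batch_input_data_spec : Claim_equal_split_batch_input_data := by
  intro input_data splitter _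
  unfold Spec_split_batch_input_data split_batch_input_data split_batch_input_data_alt
  simp only []
  rw [show (fun (st : List (List Char) × List Char) i =>
        pvStepA splitter.toList st (PySem.List.slice input_data.toList (some i) (some (i + 64)))) =
      (fun st y => pvStepA splitter.toList st
        ((fun i => PySem.List.slice input_data.toList (some i) (some (i + 64))) y)) from rfl,
    ← List.foldl_map]
  have hne : ∀ c ∈ (PySem.List.pyRange 0 (PySem.Str.len input_data) 64).map
      (fun i => PySem.List.slice input_data.toList (some i) (some (i + 64))), c ≠ [] := by
    intro c hc
    rcases List.mem_map.mp hc with ⟨i, hi, rfl⟩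
    rcases (PySem.List.mem_pyRange_iff_of_pos (by norm_num : (0:Int) < 64) i).mp hi with ⟨h0, hlt, -⟩
    exact pvChunk_ne _ i h0 (by rwa [PySem.Str.len_eq] at hlt)
  have := pvMain splitter.toList
    ((PySem.List.pyRange 0 (PySem.Str.len input_data) 64).map
      (fun i => PySem.List.slice input_data.toList (some i) (some (i + 64)))) hne [] []
  simp only [List.nil_append, pvRes_nil] at this
  rw [this]
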